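-- pv_equiv track=rewrite | github.com/1468348557/devops-platform | offline-deploy/compose/myproject/branch_create/config_parser.py | _map_project
-- ===== SOURCE A (Python) =====
-- from typing import Optional
--
-- STANDARD_PROJECTS = [
--     "hobo-customer-front",
--     "hobo-element-front",
--     "hobo-credit-front",
--     "hobo-asset-front",
--     "hobo-payment-front",
--     "hobo-deposit-front",
--     "hobo-pub-front",
--     "hobo-work-front",
--     "hobo-image-component",
--     "hobo-factory-front",
--     "hobo-flow-orch",
--     "hobo-flow-config",
--     "hobo-pub-flow",
--     "hobo-deposit-flow",
--     "hobo-customer-flow",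
--     "hobo-credit-flow",
--     "hobo-element-flow",
--     "hobo-asset-flow",
--     "hobo-payment-flow",
-- ]
--
-- def _normalize(name: str) -> str:
--     return name.strip().lower().replace(" ", "").replace("_", "-")
--
-- def _map_project(raw: str) -> Optional[str]:
--     n = _normalize(raw)
--     if n in STANDARD_PROJECTS:
--         return n
--     if not n.startswith("hobo-"):
--         candidate = f"hobo-{n}"
--         if candidate in STANDARD_PROJECTS:
--             return candidate
--     suffix = n.replace("hobo-", "")
--     for p in STANDARD_PROJECTS:
--         if p.replace("hobo-", "") == suffix:
--             return p
--     return None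
-- ===== SOURCE B (Python) =====
-- from typing import Optional
--
-- STANDARD_PROJECTS = [
--     "hobo-customer-front",
--     "hobo-element-front",
--     "hobo-credit-front",
--     "hobo-asset-front",
--     "hobo-payment-front",
--     "hobo-deposit-front",
--     "hobo-pub-front",
--     "hobo-work-front",
--     "hobo-image-component",
--     "hobo-factory-front",
--     "hobo-flow-orch",
--     "hobo-flow-config",
--     "hobo-pub-flow",
--     "hobo-deposit-flow",
--     "hobo-customer-flow",
--     "hobo-credit-flow",
--     "hobo-element-flow",
--     "hobo-asset-flow",
--     "hobo-payment-flow",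
-- ]
--
-- # Index built once: suffix (project name with every "hobo-" removed) -> full name.
-- SUFFIX_MAP = {p.replace("hobo-", ""): p for p in STANDARD_PROJECTS}
--
-- def _normalize(name: str) -> str:
--     return name.strip().lower().replace(" ", "").replace("_", "-")
--
-- def _map_project(raw: str) -> Optional[str]:
--     return SUFFIX_MAP.get(_normalize(raw).replace("hobo-", ""))
-- ===== Notes on version B (the rewrite author's own statement) =====
-- stated objective: simpler
-- what changed: A's three sequential stages (exact membership test, hobo- prefix candidate branch, suffix scan loop) are replaced by one module-level suffix->name dict built once plus a single normalized lookup.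
import Mathlib
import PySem

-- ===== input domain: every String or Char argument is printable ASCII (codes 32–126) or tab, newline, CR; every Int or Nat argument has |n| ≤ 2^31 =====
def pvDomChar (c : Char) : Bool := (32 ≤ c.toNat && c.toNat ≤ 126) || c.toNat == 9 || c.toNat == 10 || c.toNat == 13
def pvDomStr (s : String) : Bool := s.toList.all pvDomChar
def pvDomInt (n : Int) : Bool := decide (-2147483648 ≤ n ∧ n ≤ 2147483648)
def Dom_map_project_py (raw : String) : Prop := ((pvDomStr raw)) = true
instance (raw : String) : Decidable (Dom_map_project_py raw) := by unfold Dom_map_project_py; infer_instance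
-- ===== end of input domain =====

-- B replaces A's three sequential matching stages with one suffix->name index built once; objective: simpler.

-- ===== PORT A =====
def STANDARD_PROJECTS : List String :=
  ["hobo-customer-front", "hobo-element-front", "hobo-credit-front", "hobo-asset-front",
   "hobo-payment-front", "hobo-deposit-front", "hobo-pub-front", "hobo-work-front",
   "hobo-image-component", "hobo-factory-front", "hobo-flow-orch", "hobo-flow-config",
   "hobo-pub-flow", "hobo-deposit-flow", "hobo-customer-flow", "hobo-credit-flow",
   "hobo-element-flow", "hobo-asset-flow", "hobo-payment-flow"]

-- _normalize, a helper both Pythons share verbatim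
def pyNormalize (name : String) : String :=
  PySem.Str.replace (PySem.Str.replace (PySem.Str.lower (PySem.Str.strip name)) " " "") "_" "-"

-- A's 'for p in STANDARD_PROJECTS' suffix scan
def pyALoop : List String → String → Option String
  | [], _ => none
  | p :: ps, suffix =>
      if PySem.Str.replace p "hobo-" "" == suffix then some p else pyALoop ps suffix

def map_project_py (raw : String) : Option String :=
  let n := pyNormalize raw
  if STANDARD_PROJECTS.contains n then some n
  else if !(PySem.Str.startswith n "hobo-") && STANDARD_PROJECTS.contains ("hobo-" ++ n) then
    some ("hobo-" ++ n)
  else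
    pyALoop STANDARD_PROJECTS (PySem.Str.replace n "hobo-" "")

-- ===== PORT B =====
-- the module-level dict comprehension {p.replace("hobo-",""): p for p in STANDARD_PROJECTS}
def SUFFIX_MAP : PySem.Dict String String :=
  PySem.Dict.ofList (STANDARD_PROJECTS.map (fun p => (PySem.Str.replace p "hobo-" "", p)))

def map_project_py_alt (raw : String) : Option String :=
  SUFFIX_MAP.get? (PySem.Str.replace (pyNormalize raw) "hobo-" "")

-- ===== PRECONDITION & SPEC =====
def Spec_map_project_py (raw : String) (out : Option String) : Prop := out = map_project_py_alt raw
instance (raw : String) (out : Option String) : Decidable (Spec_map_project_py raw out) := by unfold Spec_map_project_py; infer_instance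

-- ===== CLAIM (what is proved, stated in full; the proofs are below) =====
def Claim_equal_map_project_py : Prop := ∀ (raw : String), Dom_map_project_py raw → Spec_map_project_py raw (map_project_py raw)

-- ===== LEMMAS AND PROOFS =====

-- "hobo-" ++ · is injective
theorem hobo_append_inj {n m : String} (h : "hobo-" ++ n = "hobo-" ++ m) : n = m := by
  have hd := congrArg String.toList h
  rw [String.toList_append, String.toList_append] at hd
  exact String.ext (List.append_cancel_left hd)

-- the precomputed index, listed out
theorem smap_items : SUFFIX_MAP = PySem.Dict.mk
  [("customer-front", "hobo-customer-front"),
     ("element-front", "hobo-element-front"),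
     ("credit-front", "hobo-credit-front"),
     ("asset-front", "hobo-asset-front"),
     ("payment-front", "hobo-payment-front"),
     ("deposit-front", "hobo-deposit-front"),
     ("pub-front", "hobo-pub-front"),
     ("work-front", "hobo-work-front"),
     ("image-component", "hobo-image-component"),
     ("factory-front", "hobo-factory-front"),
     ("flow-orch", "hobo-flow-orch"),
     ("flow-config", "hobo-flow-config"),
     ("pub-flow", "hobo-pub-flow"),
     ("deposit-flow", "hobo-deposit-flow"),
     ("customer-flow", "hobo-customer-flow"),
     ("credit-flow", "hobo-credit-flow"),
     ("element-flow", "hobo-element-flow"),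
     ("asset-flow", "hobo-asset-flow"),
     ("payment-flow", "hobo-payment-flow")] := by decide

-- the suffix scan over the fixed list IS the lookup in the precomputed index
theorem pyALoop_eq_lookup (s : String) :
    pyALoop STANDARD_PROJECTS s = SUFFIX_MAP.get? s := by
  simp only [smap_items, STANDARD_PROJECTS, pyALoop, PySem.Dict.get?_mk_cons,
      show PySem.Str.replace "hobo-customer-front" "hobo-" "" = "customer-front" from by decide,
      show PySem.Str.replace "hobo-element-front" "hobo-" "" = "element-front" from by decide,
      show PySem.Str.replace "hobo-credit-front" "hobo-" "" = "credit-front" from by decide,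
      show PySem.Str.replace "hobo-asset-front" "hobo-" "" = "asset-front" from by decide,
      show PySem.Str.replace "hobo-payment-front" "hobo-" "" = "payment-front" from by decide,
      show PySem.Str.replace "hobo-deposit-front" "hobo-" "" = "deposit-front" from by decide,
      show PySem.Str.replace "hobo-pub-front" "hobo-" "" = "pub-front" from by decide,
      show PySem.Str.replace "hobo-work-front" "hobo-" "" = "work-front" from by decide,
      show PySem.Str.replace "hobo-image-component" "hobo-" "" = "image-component" from by decide,
      show PySem.Str.replace "hobo-factory-front" "hobo-" "" = "factory-front" from by decide,
      show PySem.Str.replace "hobo-flow-orch" "hobo-" "" = "flow-orch" from by decide,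
      show PySem.Str.replace "hobo-flow-config" "hobo-" "" = "flow-config" from by decide,
      show PySem.Str.replace "hobo-pub-flow" "hobo-" "" = "pub-flow" from by decide,
      show PySem.Str.replace "hobo-deposit-flow" "hobo-" "" = "deposit-flow" from by decide,
      show PySem.Str.replace "hobo-customer-flow" "hobo-" "" = "customer-flow" from by decide,
      show PySem.Str.replace "hobo-credit-flow" "hobo-" "" = "credit-flow" from by decide,
      show PySem.Str.replace "hobo-element-flow" "hobo-" "" = "element-flow" from by decide,
      show PySem.Str.replace "hobo-asset-flow" "hobo-" "" = "asset-flow" from by decide,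
      show PySem.Str.replace "hobo-payment-flow" "hobo-" "" = "payment-flow" from by decide]
  rfl

set_option maxHeartbeats 4000000 in
theorem core_eq (n : String) :
    (if STANDARD_PROJECTS.contains n then some n
     else if !(PySem.Str.startswith n "hobo-") && STANDARD_PROJECTS.contains ("hobo-" ++ n) then
       some ("hobo-" ++ n)
     else pyALoop STANDARD_PROJECTS (PySem.Str.replace n "hobo-" ""))
    = SUFFIX_MAP.get? (PySem.Str.replace n "hobo-" "") := by
  by_cases h1 : STANDARD_PROJECTS.contains n = true
  · rw [if_pos h1]
    have hm : n ∈ STANDARD_PROJECTS := by simpa using h1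
    fin_cases hm <;> decide
  · rw [if_neg h1]
    by_cases h2 : (!(PySem.Str.startswith n "hobo-") && STANDARD_PROJECTS.contains ("hobo-" ++ n)) = true
    · rw [if_pos h2]
      have hc : STANDARD_PROJECTS.contains ("hobo-" ++ n) = true := (Bool.and_eq_true _ _).mp h2 |>.2
      have hm : "hobo-" ++ n ∈ STANDARD_PROJECTS := by simpa using hc
      simp only [STANDARD_PROJECTS, List.mem_cons, List.not_mem_nil, or_false] at hm
      rcases hm with h|h|h|h|h|h|h|h|h|h|h|h|h|h|h|h|h|h|h
      · have hn := hobo_append_inj (m := "customer-front") (h.trans (by decide))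
        subst hn; decide
      · have hn := hobo_append_inj (m := "element-front") (h.trans (by decide))
        subst hn; decide
      · have hn := hobo_append_inj (m := "credit-front") (h.trans (by decide))
        subst hn; decide
      · have hn := hobo_append_inj (m := "asset-front") (h.trans (by decide))
        subst hn; decide
      · have hn := hobo_append_inj (m := "payment-front") (h.trans (by decide))
        subst hn; decide
      · have hn := hobo_append_inj (m := "deposit-front") (h.trans (by decide))
        subst hn; decide
      · have hn := hobo_append_inj (m := "pub-front") (h.trans (by decide))
        subst hn; decide
      · have hn := hobo_append_inj (m := "work-front") (h.trans (by decide))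
        subst hn; decide
      · have hn := hobo_append_inj (m := "image-component") (h.trans (by decide))
        subst hn; decide
      · have hn := hobo_append_inj (m := "factory-front") (h.trans (by decide))
        subst hn; decide
      · have hn := hobo_append_inj (m := "flow-orch") (h.trans (by decide))
        subst hn; decide
      · have hn := hobo_append_inj (m := "flow-config") (h.trans (by decide))
        subst hn; decide
      · have hn := hobo_append_inj (m := "pub-flow") (h.trans (by decide))
        subst hn; decide
      · have hn := hobo_append_inj (m := "deposit-flow") (h.trans (by decide))
        subst hn; decide
      · have hn := hobo_append_inj (m := "customer-flow") (h.trans (by decide))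
        subst hn; decide
      · have hn := hobo_append_inj (m := "credit-flow") (h.trans (by decide))
        subst hn; decide
      · have hn := hobo_append_inj (m := "element-flow") (h.trans (by decide))
        subst hn; decide
      · have hn := hobo_append_inj (m := "asset-flow") (h.trans (by decide))
        subst hn; decide
      · have hn := hobo_append_inj (m := "payment-flow") (h.trans (by decide))
        subst hn; decide
    · rw [if_neg h2]
      exact pyALoop_eq_lookup _

-- ===== VERDICT (by name: the statement is the Claim_ definition above) =====
theorem map_project_py_spec : Claim_equal_map_project_py := by
  intro raw _
  unfold Spec_map_project_py map_project_py map_project_py_alt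
  exact core_eq (pyNormalize raw)
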